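-- pv_equiv track=rewrite | github.com/rentruewang/problolm | detect_ai.py | parse_model_list
-- ===== SOURCE A (Python) =====
-- from typing import Dict, Iterable, List, Optional, Tuple
--
-- DEFAULT_MODELS = ["gpt2"]
--
-- def parse_model_list(values: Iterable[str]) -> List[str]:
--     """Normalize comma-separated model IDs into a flat list."""
--     models: List[str] = []
--     for value in values:
--         if not value:
--             continue
--         for item in value.split(","):
--             item = item.strip()
--             if item:
--                 models.append(item)
--     return models or DEFAULT_MODELS
-- ===== SOURCE B (Python) =====
-- from typing import Iterable, List
--
-- DEFAULT_MODELS = ["gpt2"]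
--
-- def parse_model_list(values: Iterable[str]) -> List[str]:
--     """Normalize comma-separated model IDs into a flat list."""
--     models: List[str] = []
--     buf: List[str] = []
--
--     def flush() -> None:
--         i, j = 0, len(buf)
--         while i < j and buf[i].isspace():
--             i += 1
--         while j > i and buf[j - 1].isspace():
--             j -= 1
--         if i < j:
--             models.append("".join(buf[i:j]))
--         buf.clear()
--
--     for value in values:
--         for ch in value:
--             if ch == ',':
--                 flush()
--             else:
--                 buf.append(ch)
--         flush()
--     return models if models else DEFAULT_MODELS
-- ===== Notes on version B (the rewrite author's own statement) =====
-- stated objective: alternative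
-- what changed: B replaces A's split/strip library pipeline by a single character-level state machine: it streams every character of every value through one buffer, flushing a trimmed token at each comma and at each value boundary, so no intermediate split lists or stripped copies are ever built.
import Mathlib
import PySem

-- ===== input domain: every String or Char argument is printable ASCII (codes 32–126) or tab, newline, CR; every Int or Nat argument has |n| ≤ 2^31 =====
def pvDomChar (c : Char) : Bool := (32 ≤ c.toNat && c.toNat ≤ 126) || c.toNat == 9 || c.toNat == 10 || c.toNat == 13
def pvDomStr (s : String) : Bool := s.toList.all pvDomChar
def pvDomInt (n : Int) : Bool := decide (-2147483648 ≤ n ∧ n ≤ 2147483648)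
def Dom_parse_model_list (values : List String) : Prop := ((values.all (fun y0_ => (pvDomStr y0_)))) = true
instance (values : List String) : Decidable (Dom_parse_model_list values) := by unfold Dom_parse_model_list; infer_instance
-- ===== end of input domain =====

-- B replaces A's split/strip pipeline by a single character-level state machine: it streams every
-- character through one buffer, flushing a trimmed token at each comma and each value boundary.

-- ===== PORT A =====
-- 'not value' on a str is 'value == ""'; value.split(",") uses the non-empty separator ",",
-- so PySem.Str.split? never returns none here and '.getD []' only totalizes it.
def parse_model_list (values : List String) : List String :=
  let models : List String := values.foldl (fun models value =>
    if value == "" then models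
    else ((PySem.Str.split? value ",").getD []).foldl (fun models item =>
      let item := PySem.Str.strip item
      if item == "" then models else models ++ [item]) models) []
  if models == [] then ["gpt2"] else models

-- ===== PORT B =====
-- flush(): the two index-trimming while-loops of Source B become the two dropWhile passes
-- (drop leading spaces, then drop trailing spaces via reverse); ch.isspace() is PySem.Chars.isspace.
def pvTrim (buf : List Char) : List Char :=
  ((buf.dropWhile PySem.Chars.isspace).reverse.dropWhile PySem.Chars.isspace).reverse

def pvFlush (models : List String) (buf : List Char) : List String :=
  let t := pvTrim buf
  if t == [] then models else models ++ [String.ofList t]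

def parse_model_list_alt (values : List String) : List String :=
  let st := values.foldl (fun (st : List String × List Char) value =>
    let st := value.toList.foldl (fun (st : List String × List Char) ch =>
      if ch == ',' then (pvFlush st.1 st.2, []) else (st.1, st.2 ++ [ch])) st
    (pvFlush st.1 st.2, [])) ([], [])
  if st.1 == [] then ["gpt2"] else st.1

-- ===== PRECONDITION & SPEC =====
def Spec_parse_model_list (values : List String) (out : List String) : Prop := out = parse_model_list_alt values
instance (values : List String) (out : List String) : Decidable (Spec_parse_model_list values out) := by unfold Spec_parse_model_list; infer_instance

-- ===== CLAIM (what is proved, stated in full; the proofs are below) =====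
def Claim_equal_parse_model_list : Prop := ∀ (values : List String), Dom_parse_model_list values → Spec_parse_model_list values (parse_model_list values)

-- ===== LEMMAS AND PROOFS =====

-- Structural recursion computing Python's s.split(",") on char lists (proof-side mirror of PySem.Chars.splitOn for the separator [',']).
def pvSplitC : List Char → List (List Char)
  | [] => [[]]
  | c :: rest =>
    if c = ',' then [] :: pvSplitC rest
    else match pvSplitC rest with
      | [] => [[c]]
      | p :: ps => (c :: p) :: ps

theorem pvSplitC_ne_nil (cs : List Char) : pvSplitC cs ≠ [] := by
  cases cs with
  | nil => simp [pvSplitC]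
  | cons c rest =>
    simp only [pvSplitC]
    split_ifs with h
    · simp
    · cases hr : pvSplitC rest <;> simp

theorem pvSplitC_go (fuel : Nat) (l cur : List Char) (accs : List (List Char))
    (h : l.length ≤ fuel) :
    PySem.Chars.splitOn.go [','] fuel l cur accs =
      accs.reverse ++ (match pvSplitC l with
        | [] => [cur.reverse]
        | p :: ps => (cur.reverse ++ p) :: ps) := by
  induction fuel generalizing l cur accs with
  | zero =>
    have : l = [] := List.eq_nil_of_length_eq_zero (Nat.le_zero.mp h)
    subst this
    simp [PySem.Chars.splitOn.go, pvSplitC]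
  | succ fuel ih =>
    cases l with
    | nil => simp [PySem.Chars.splitOn.go, pvSplitC]
    | cons c rest =>
      by_cases hc : c = ','
      · subst hc
        rw [show PySem.Chars.splitOn.go [','] (fuel+1) (','::rest) cur accs
            = PySem.Chars.splitOn.go [','] fuel rest [] (cur.reverse :: accs) from by
          simp [PySem.Chars.splitOn.go, List.isPrefixOf]]
        rw [ih rest [] (cur.reverse :: accs) (by simpa using Nat.le_of_succ_le_succ (by simpa using h))]
        cases hr : pvSplitC rest with
        | nil => exact absurd hr (pvSplitC_ne_nil rest)
        | cons p ps => simp [pvSplitC, hr]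
      · rw [show PySem.Chars.splitOn.go [','] (fuel+1) (c::rest) cur accs
            = PySem.Chars.splitOn.go [','] fuel rest (c :: cur) accs from by
          simp [PySem.Chars.splitOn.go, List.isPrefixOf, Ne.symm hc]]
        rw [ih rest (c :: cur) accs (by simpa using Nat.le_of_succ_le_succ (by simpa using h))]
        cases hr : pvSplitC rest with
        | nil => exact absurd hr (pvSplitC_ne_nil rest)
        | cons p ps => simp [pvSplitC, hc, hr]

theorem splitOn_eq_pvSplitC (cs : List Char) :
    PySem.Chars.splitOn cs [','] = pvSplitC cs := by
  rw [PySem.Chars.splitOn, pvSplitC_go _ _ _ _ (by omega)]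
  cases hr : pvSplitC cs with
  | nil => exact absurd hr (pvSplitC_ne_nil cs)
  | cons p ps => simp

theorem pvSplitC_append (a b : List Char) :
    pvSplitC (a ++ ',' :: b) = pvSplitC a ++ pvSplitC b := by
  induction a with
  | nil => simp [pvSplitC]
  | cons c a ih =>
    by_cases hc : c = ','
    · subst hc; simp [pvSplitC, ih]
    · simp only [List.cons_append, pvSplitC, hc, if_false, ih]
      cases ha : pvSplitC a with
      | nil => exact absurd ha (pvSplitC_ne_nil a)
      | cons p ps => simp

-- canonical result per input string: split on ',', strip, keep non-empty
def pvG (cs : List Char) : List String :=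
  ((pvSplitC cs).filter (fun ds => !(PySem.Chars.strip ds).isEmpty)).map
    (fun ds => String.ofList (PySem.Chars.strip ds))

theorem split?_comma (s : String) :
    (PySem.Str.split? s ",").getD [] = (pvSplitC s.toList).map String.ofList := by
  have : (",").toList = [','] := by decide
  simp [PySem.Str.split?, PySem.Chars.split?, this, splitOn_eq_pvSplitC]

theorem pvBeq_empty (ds : List Char) :
    (String.ofList (PySem.Chars.strip ds) == "") = (PySem.Chars.strip ds).isEmpty := by
  cases hst : PySem.Chars.strip ds with
  | nil => decide
  | cons c cs =>
    simp only [List.isEmpty_cons]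
    rw [beq_eq_false_iff_ne]
    intro h
    have := congrArg String.toList h
    simp at this

theorem pvStrip_ofList (ds : List Char) :
    PySem.Str.strip (String.ofList ds) = String.ofList (PySem.Chars.strip ds) := by
  simp [PySem.Str.strip]

theorem pv_inner_eq (s : String) (ms : List String) :
    (((PySem.Str.split? s ",").getD []).foldl (fun models item =>
      let item := PySem.Str.strip item
      if item == "" then models else models ++ [item]) ms) = ms ++ pvG s.toList := by
  rw [split?_comma]
  rw [show (fun (models : List String) item =>
      let item := PySem.Str.strip item
      if item == "" then models else models ++ [item])
    = (fun acc x => if (fun t => !(PySem.Str.strip t == "")) x then acc ++ [PySem.Str.strip x] else acc) from by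
    funext ms item; by_cases h : PySem.Str.strip item == "" <;> simp [h]]
  rw [PySem.List.foldl_append_if]
  congr 1
  rw [List.filter_map, List.map_map]
  unfold pvG
  congr 1
  · funext ds
    simp [pvStrip_ofList, Function.comp]
  · congr 1
    funext ds
    simp only [Function.comp, pvStrip_ofList, pvBeq_empty]

theorem pvG_nil : pvG [] = [] := by decide

theorem parse_A_eq (values : List String) :
    parse_model_list values =
      (if values.flatMap (fun v => pvG v.toList) == [] then ["gpt2"]
       else values.flatMap (fun v => pvG v.toList)) := by
  unfold parse_model_list
  rw [show (fun (models : List String) value =>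
      if value == "" then models
      else ((PySem.Str.split? value ",").getD []).foldl (fun models item =>
        let item := PySem.Str.strip item
        if item == "" then models else models ++ [item]) models)
    = (fun acc value => acc ++ pvG value.toList) from by
    funext ms value
    by_cases h : value == ""
    · have hv : value = "" := by simpa using h
      simp [hv, pvG_nil]
    · simp only [h]
      exact pv_inner_eq value ms]
  rw [PySem.List.foldl_append_eq_flatMap]
  simp

-- ===== B-side lemmas: the state machine computes pvG =====

theorem pvTrim_eq_strip (buf : List Char) : pvTrim buf = PySem.Chars.strip buf := rfl

theorem pvSplitC_no_comma (buf : List Char) (h : ',' ∉ buf) : pvSplitC buf = [buf] := by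
  induction buf with
  | nil => simp [pvSplitC]
  | cons c rest ih =>
    have hc : c ≠ ',' := fun hc => h (hc ▸ List.mem_cons_self ..)
    have hr : ',' ∉ rest := fun hm => h (List.mem_cons_of_mem _ hm)
    simp [pvSplitC, hc, ih hr]

theorem pvFlush_eq (models : List String) (buf : List Char) (h : ',' ∉ buf) :
    pvFlush models buf = models ++ pvG buf := by
  unfold pvFlush pvG
  rw [pvSplitC_no_comma buf h, pvTrim_eq_strip]
  by_cases hs : PySem.Chars.strip buf = []
  · simp [hs]
  · simp [hs, List.isEmpty_iff.not.mpr hs]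

theorem pvG_append (a b : List Char) :
    pvG (a ++ ',' :: b) = pvG a ++ pvG b := by
  unfold pvG
  rw [pvSplitC_append, List.filter_append, List.map_append]

-- scanning a comma-free buffer `buf` then the chars `cs`, and flushing at the end,
-- appends exactly the tokens of `buf ++ cs`
theorem pvScan_eq (cs : List Char) (models : List String) (buf : List Char) (h : ',' ∉ buf) :
    pvFlush
      (cs.foldl (fun (st : List String × List Char) ch =>
        if ch == ',' then (pvFlush st.1 st.2, []) else (st.1, st.2 ++ [ch])) (models, buf)).1
      (cs.foldl (fun (st : List String × List Char) ch =>
        if ch == ',' then (pvFlush st.1 st.2, []) else (st.1, st.2 ++ [ch])) (models, buf)).2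
    = models ++ pvG (buf ++ cs) := by
  induction cs generalizing models buf with
  | nil => simpa using pvFlush_eq models buf h
  | cons ch cs ih =>
    by_cases hc : ch = ','
    · subst hc
      simp only [List.foldl_cons, beq_self_eq_true, if_pos]
      rw [ih (pvFlush models buf) [] (by simp), pvFlush_eq models buf h, pvG_append]
      simp
    · simp only [List.foldl_cons, beq_eq_false_iff_ne.mpr hc, Bool.false_eq_true, if_false]
      rw [ih models (buf ++ [ch]) (by
        intro hm
        rcases List.mem_append.mp hm with hm | hm
        · exact h hm
        · exact hc (List.mem_singleton.mp hm).symm)]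
      simp

theorem pvValScan_eq (values : List String) (models : List String) :
    values.foldl (fun (st : List String × List Char) value =>
      let st := value.toList.foldl (fun (st : List String × List Char) ch =>
        if ch == ',' then (pvFlush st.1 st.2, []) else (st.1, st.2 ++ [ch])) st
      (pvFlush st.1 st.2, [])) (models, [])
    = (models ++ values.flatMap (fun v => pvG v.toList), []) := by
  induction values generalizing models with
  | nil => simp
  | cons v vs ih =>
    simp only [List.foldl_cons]
    have := pvScan_eq v.toList models [] (by simp)
    rw [show (v.toList.foldl (fun (st : List String × List Char) ch =>
        if ch == ',' then (pvFlush st.1 st.2, []) else (st.1, st.2 ++ [ch])) (models, [])) =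
        ((v.toList.foldl (fun (st : List String × List Char) ch =>
        if ch == ',' then (pvFlush st.1 st.2, []) else (st.1, st.2 ++ [ch])) (models, [])).1,
         (v.toList.foldl (fun (st : List String × List Char) ch =>
        if ch == ',' then (pvFlush st.1 st.2, []) else (st.1, st.2 ++ [ch])) (models, [])).2) from rfl]
    rw [this, ih]
    simp

theorem parse_B_eq (values : List String) :
    parse_model_list_alt values =
      (if values.flatMap (fun v => pvG v.toList) == [] then ["gpt2"]
       else values.flatMap (fun v => pvG v.toList)) := by
  unfold parse_model_list_alt
  rw [pvValScan_eq values []]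
  simp

-- ===== VERDICT (by name: the statement is the Claim_ definition above) =====
theorem parse_model_list_spec : Claim_equal_parse_model_list := by
  intro values _
  unfold Spec_parse_model_list
  rw [parse_A_eq, parse_B_eq]
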